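-- pv_equiv track=rewrite | github.com/daipengwa/Neural-Point-Cloud-Rendering-via-Multi-Plane-Projection | utils.py | prepare_data_ScanNet
-- ===== SOURCE A (Python) =====
-- def prepare_data_ScanNet(dir1, dir2, dir3, dir4, num_image):
--
--     image_names = []
--     index_names = []
--     index_names_1 = []
--     camera_names = []
--
--     for i in range(num_image):
--         image_names.append(dir1 + '%s.jpg' % i)
--         camera_names.append(dir2 + '%s.txt' % i)
--         index_names.append(dir3 + '%s_compressed.npz' % i)
--         index_names_1.append(dir4 + '%s_weight.npz' % i)
--
--
--     image_names_train = []
--     image_names_test = []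
--     index_names_train = []
--     index_names_test = []
--     camera_names_train = []
--     camera_names_test = []
--     index_names_1_train = []
--     index_names_1_test = []
--
--     flag = False
--     for i in range(100):
--
--         left = int(20 + 100*i)
--         right = int(80 + 100*i)-1
--
--         if left > len(image_names):
--             break
--
--         if right > len(image_names):
--             right = len(image_names)
--             flag = True
--
--         image_names_train = image_names_train + image_names[left:right]
--         image_names_test = image_names_test + image_names[int(i*100 - 1):int(i*100)]
--         index_names_train = index_names_train + index_names[left:right]
--         index_names_test = index_names_test + index_names[int(i*100 - 1):int(i*100)]
--         camera_names_train = camera_names_train + camera_names[left:right]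
--         camera_names_test = camera_names_test + camera_names[int(i*100 - 1):int(i*100)]
--         index_names_1_train = index_names_1_train + index_names_1[left:right]
--         index_names_1_test = index_names_1_test + index_names_1[int(i*100 - 1):int(i*100)]
--
--         if flag:
--             break
--
--     return image_names_train, index_names_train, camera_names_train, index_names_1_train, image_names_test, index_names_test, camera_names_test, index_names_1_test
-- ===== SOURCE B (Python) =====
-- def prepare_data_ScanNet(dir1, dir2, dir3, dir4, num_image):
--     # Frames are grouped into hundred-frame chunks (at most 100 chunks):
--     # frames 20..78 of each chunk (truncated at num_image) go to training,
--     # and the last frame before each chunk boundary goes to testing.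
--     train_idx = []
--     test_idx = []
--     for i in range(100):
--         start = 20 + 100 * i
--         if start > num_image:
--             break
--         train_idx.extend(range(start, min(start + 59, num_image)))
--         if i > 0:
--             test_idx.append(100 * i - 1)
--
--     def names(prefix, suffix, idx):
--         return [prefix + str(j) + suffix for j in idx]
--
--     return (names(dir1, '.jpg', train_idx),
--             names(dir3, '_compressed.npz', train_idx),
--             names(dir2, '.txt', train_idx),
--             names(dir4, '_weight.npz', train_idx),
--             names(dir1, '.jpg', test_idx),
--             names(dir3, '_compressed.npz', test_idx),
--             names(dir2, '.txt', test_idx),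
--             names(dir4, '_weight.npz', test_idx))
-- ===== Notes on version B (the rewrite author's own statement) =====
-- stated objective: simpler
-- what changed: B computes the train/test frame indices in one small chunk loop and then formats the eight name lists directly by mapping, instead of materializing four full 0..num_image-1 filename lists and slicing them with break/flag machinery over eight accumulators.
import Mathlib
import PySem

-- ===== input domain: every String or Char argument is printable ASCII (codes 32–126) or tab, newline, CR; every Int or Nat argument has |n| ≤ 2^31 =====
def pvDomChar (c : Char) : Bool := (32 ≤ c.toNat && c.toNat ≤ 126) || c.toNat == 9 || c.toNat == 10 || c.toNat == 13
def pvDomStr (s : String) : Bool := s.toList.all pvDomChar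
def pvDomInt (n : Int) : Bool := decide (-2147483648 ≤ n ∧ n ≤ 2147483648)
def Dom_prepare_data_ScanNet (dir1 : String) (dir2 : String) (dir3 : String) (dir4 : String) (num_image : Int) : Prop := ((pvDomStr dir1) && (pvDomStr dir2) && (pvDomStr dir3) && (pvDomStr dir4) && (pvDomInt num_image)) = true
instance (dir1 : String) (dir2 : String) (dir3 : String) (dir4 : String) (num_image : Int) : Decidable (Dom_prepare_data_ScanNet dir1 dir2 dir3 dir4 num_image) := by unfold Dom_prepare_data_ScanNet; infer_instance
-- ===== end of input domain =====

-- B computes the train/test frame indices in one small chunk loop and formats the eight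
-- name lists by mapping, instead of materializing four full 0..num_image-1 lists and
-- slicing them with break/flag machinery (objective: simpler decomposition).


-- ===== PORT A =====
-- Python's `for i in range(100): … break …` second loop: fuel counts the remaining
-- iterations (starts at 100), i is the loop variable.  `flag` is only ever set in the
-- same iteration that breaks on it, so it is the middle if-branch here.
-- State registers in Python declaration order:
--   imgTr imgTe idxTr idxTe camTr camTe idx1Tr idx1Te.
def prepDataLoopA (img cam idx idx1 : List String) :
    Nat → Int →
    List String → List String → List String → List String →
    List String → List String → List String → List String →
    List String × List String × List String × List String × List String × List String × List String × List String
  | 0, _, imgTr, imgTe, idxTr, idxTe, camTr, camTe, idx1Tr, idx1Te =>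
      (imgTr, idxTr, camTr, idx1Tr, imgTe, idxTe, camTe, idx1Te)
  | Nat.succ fuel, i, imgTr, imgTe, idxTr, idxTe, camTr, camTe, idx1Tr, idx1Te =>
      let left : Int := 20 + 100 * i
      let right : Int := 80 + 100 * i - 1
      if (img.length : Int) < left then  -- `if left > len(image_names): break`
        (imgTr, idxTr, camTr, idx1Tr, imgTe, idxTe, camTe, idx1Te)
      else if (img.length : Int) < right then
        -- `right = len(image_names); flag = True`, append, then `if flag: break`
        (imgTr ++ PySem.List.slice img (some left) (some (img.length : Int)),
         idxTr ++ PySem.List.slice idx (some left) (some (img.length : Int)),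
         camTr ++ PySem.List.slice cam (some left) (some (img.length : Int)),
         idx1Tr ++ PySem.List.slice idx1 (some left) (some (img.length : Int)),
         imgTe ++ PySem.List.slice img (some (i * 100 - 1)) (some (i * 100)),
         idxTe ++ PySem.List.slice idx (some (i * 100 - 1)) (some (i * 100)),
         camTe ++ PySem.List.slice cam (some (i * 100 - 1)) (some (i * 100)),
         idx1Te ++ PySem.List.slice idx1 (some (i * 100 - 1)) (some (i * 100)))
      else
        prepDataLoopA img cam idx idx1 fuel (i + 1)
          (imgTr ++ PySem.List.slice img (some left) (some right))
          (imgTe ++ PySem.List.slice img (some (i * 100 - 1)) (some (i * 100)))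
          (idxTr ++ PySem.List.slice idx (some left) (some right))
          (idxTe ++ PySem.List.slice idx (some (i * 100 - 1)) (some (i * 100)))
          (camTr ++ PySem.List.slice cam (some left) (some right))
          (camTe ++ PySem.List.slice cam (some (i * 100 - 1)) (some (i * 100)))
          (idx1Tr ++ PySem.List.slice idx1 (some left) (some right))
          (idx1Te ++ PySem.List.slice idx1 (some (i * 100 - 1)) (some (i * 100)))

def prepare_data_ScanNet (dir1 : String) (dir2 : String) (dir3 : String) (dir4 : String) (num_image : Int) : List String × List String × List String × List String × List String × List String × List String × List String :=
  -- first loop: build image_names, camera_names, index_names, index_names_1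
  let lists :=
    (PySem.List.pyRange 0 num_image).foldl
      (fun (s : List String × List String × List String × List String) i =>
        (s.1 ++ [dir1 ++ PySem.Int.toStr i ++ ".jpg"],
         s.2.1 ++ [dir2 ++ PySem.Int.toStr i ++ ".txt"],
         s.2.2.1 ++ [dir3 ++ PySem.Int.toStr i ++ "_compressed.npz"],
         s.2.2.2 ++ [dir4 ++ PySem.Int.toStr i ++ "_weight.npz"]))
      ([], [], [], [])
  prepDataLoopA lists.1 lists.2.1 lists.2.2.1 lists.2.2.2 100 0 [] [] [] [] [] [] [] []

-- ===== PORT B =====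
-- Source B's chunk loop: `for i in range(100): start = 20+100*i; if start > num_image: break; …`
def prepIdxLoopB (n : Int) : Nat → Int → List Int → List Int → List Int × List Int
  | 0, _, tr, te => (tr, te)
  | Nat.succ fuel, i, tr, te =>
      let start : Int := 20 + 100 * i
      if n < start then (tr, te)
      else prepIdxLoopB n fuel (i + 1)
             (tr ++ PySem.List.pyRange start (min (start + 59) n))
             (if 0 < i then te ++ [100 * i - 1] else te)

def prepare_data_ScanNet_alt (dir1 : String) (dir2 : String) (dir3 : String) (dir4 : String) (num_image : Int) : List String × List String × List String × List String × List String × List String × List String × List String :=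
  let idxs := prepIdxLoopB num_image 100 0 [] []
  let names := fun (pre suf : String) (l : List Int) => l.map (fun j => pre ++ PySem.Int.toStr j ++ suf)
  (names dir1 ".jpg" idxs.1, names dir3 "_compressed.npz" idxs.1,
   names dir2 ".txt" idxs.1, names dir4 "_weight.npz" idxs.1,
   names dir1 ".jpg" idxs.2, names dir3 "_compressed.npz" idxs.2,
   names dir2 ".txt" idxs.2, names dir4 "_weight.npz" idxs.2)

-- ===== PRECONDITION & SPEC =====
-- explicit DecidableEq for the 8-tuple (default instance search exceeds its size limit)
def pvDecEq8 : DecidableEq (List String × List String × List String × List String × List String × List String × List String × List String) :=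
  have i1 : DecidableEq (List String) := inferInstance
  have p1 : DecidableEq (List String × List String) := @instDecidableEqProd _ _ i1 i1
  have p2 : DecidableEq (List String × List String × List String) := @instDecidableEqProd _ _ i1 p1
  have p3 : DecidableEq (List String × List String × List String × List String) := @instDecidableEqProd _ _ i1 p2
  have p4 : DecidableEq (List String × List String × List String × List String × List String) := @instDecidableEqProd _ _ i1 p3
  have p5 : DecidableEq (List String × List String × List String × List String × List String × List String) := @instDecidableEqProd _ _ i1 p4
  have p6 : DecidableEq (List String × List String × List String × List String × List String × List String × List String) := @instDecidableEqProd _ _ i1 p5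
  @instDecidableEqProd _ _ i1 p6

def Spec_prepare_data_ScanNet (dir1 : String) (dir2 : String) (dir3 : String) (dir4 : String) (num_image : Int) (out : List String × List String × List String × List String × List String × List String × List String × List String) : Prop := out = prepare_data_ScanNet_alt dir1 dir2 dir3 dir4 num_image
instance (dir1 : String) (dir2 : String) (dir3 : String) (dir4 : String) (num_image : Int) (out : List String × List String × List String × List String × List String × List String × List String × List String) : Decidable (Spec_prepare_data_ScanNet dir1 dir2 dir3 dir4 num_image out) := by unfold Spec_prepare_data_ScanNet; exact pvDecEq8 _ _

-- ===== CLAIM (what is proved, stated in full; the proofs are below) =====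
def Claim_equal_prepare_data_ScanNet : Prop := ∀ (dir1 : String) (dir2 : String) (dir3 : String) (dir4 : String) (num_image : Int), Dom_prepare_data_ScanNet dir1 dir2 dir3 dir4 num_image → Spec_prepare_data_ScanNet dir1 dir2 dir3 dir4 num_image (prepare_data_ScanNet dir1 dir2 dir3 dir4 num_image)

-- ===== LEMMAS AND PROOFS =====

lemma sliceMap {α β : Type} (f : α → β) (l : List α) (a? b? : Option Int) :
    PySem.List.slice (l.map f) a? b? = (PySem.List.slice l a? b?).map f := by
  simp [PySem.List.slice]

lemma sliceNegOneZero {α : Type} (xs : List α) :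
    PySem.List.slice xs (some (-1)) (some 0) = [] := by
  apply List.eq_nil_of_length_eq_zero
  simp [PySem.List.length_slice, PySem.List.clampIdx]

lemma slicePyRange (n a b : Int) (ha : 0 ≤ a) (hb : 0 ≤ b) :
    PySem.List.slice (PySem.List.pyRange 0 n) (some a) (some b) = PySem.List.pyRange a (min b n) := by
  rw [PySem.List.slice_toNat _ ha hb]
  apply List.ext_getElem
  · simp [PySem.List.length_pyRange_one]; omega
  · intro k h1 h2
    simp only [List.getElem_take, List.getElem_drop, PySem.List.getElem_pyRange_one]
    simp [PySem.List.length_pyRange_one] at h1 ⊢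
    omega

-- the first Python loop builds the four mapped lists
lemma fold4_eq (f1 f2 f3 f4 : Int → String) (l : List Int)
    (a1 a2 a3 a4 : List String) :
    l.foldl (fun (s : List String × List String × List String × List String) i =>
        (s.1 ++ [f1 i], s.2.1 ++ [f2 i], s.2.2.1 ++ [f3 i], s.2.2.2 ++ [f4 i]))
      (a1, a2, a3, a4)
    = (a1 ++ l.map f1, a2 ++ l.map f2, a3 ++ l.map f3, a4 ++ l.map f4) := by
  induction l generalizing a1 a2 a3 a4 with
  | nil => simp
  | cons x xs ih => simp [ih]

-- B's loop returns its accumulators unchanged once start exceeds n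
lemma prepIdxLoopB_stop (n : Int) (fuel : Nat) (i : Int) (tr te : List Int)
    (h : n < 20 + 100 * i) : prepIdxLoopB n fuel i tr te = (tr, te) := by
  cases fuel with
  | zero => rfl
  | succ fuel => simp [prepIdxLoopB, h]

-- main lemma: both loops, run in lockstep from index i, produce the same data —
-- A's eight string accumulators are the images of B's two index accumulators
lemma loopAB (f1 f2 f3 f4 : Int → String) (n : Int) (hn : 20 ≤ n) :
    ∀ (fuel : Nat) (i : Int), 0 ≤ i →
    ∀ (tr te : List Int),
    prepDataLoopA ((PySem.List.pyRange 0 n).map f1) ((PySem.List.pyRange 0 n).map f2)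
        ((PySem.List.pyRange 0 n).map f3) ((PySem.List.pyRange 0 n).map f4)
        fuel i (tr.map f1) (te.map f1) (tr.map f3) (te.map f3)
        (tr.map f2) (te.map f2) (tr.map f4) (te.map f4)
    = ((prepIdxLoopB n fuel i tr te).1.map f1,
       (prepIdxLoopB n fuel i tr te).1.map f3,
       (prepIdxLoopB n fuel i tr te).1.map f2,
       (prepIdxLoopB n fuel i tr te).1.map f4,
       (prepIdxLoopB n fuel i tr te).2.map f1,
       (prepIdxLoopB n fuel i tr te).2.map f3,
       (prepIdxLoopB n fuel i tr te).2.map f2,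
       (prepIdxLoopB n fuel i tr te).2.map f4) := by
  intro fuel
  induction fuel with
  | zero => intro i hi tr te; simp [prepDataLoopA, prepIdxLoopB]
  | succ fuel ih =>
      intro i hi tr te
      have hlen : ∀ (g : Int → String), (((PySem.List.pyRange 0 n).map g).length : Int) = n := by
        intro g; simp [PySem.List.length_pyRange_one]; omega
      simp only [prepDataLoopA, prepIdxLoopB, hlen]
      by_cases hbrk : n < 20 + 100 * i
      · -- left > len: both loops stop with their accumulators
        simp [hbrk]
      · simp only [if_neg hbrk]
        by_cases hflag : n < 80 + 100 * i - 1
        · -- flag iteration: A appends clamped slices and breaks; B does this step and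
          -- then stops at i+1 because the next start already exceeds n
          simp only [if_pos hflag]
          rw [prepIdxLoopB_stop n fuel (i + 1) _ _ (by omega)]
          have htr : PySem.List.slice (PySem.List.pyRange 0 n) (some (20 + 100 * i)) (some n) =
              PySem.List.pyRange (20 + 100 * i) (min (20 + 100 * i + 59) n) := by
            rw [slicePyRange n _ _ (by omega) (by omega), min_self,
              min_eq_right (by omega : n ≤ 20 + 100 * i + 59)]
          by_cases hpos : (0 : Int) < i
          · have hte : PySem.List.slice (PySem.List.pyRange 0 n) (some (i * 100 - 1)) (some (i * 100)) =
                [100 * i - 1] := by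
              rw [slicePyRange n _ _ (by omega) (by omega), min_eq_left (by omega),
                PySem.List.pyRange_one_cons (by omega), PySem.List.pyRange_one_eq_nil (by omega)]
              rw [show i * 100 - 1 = 100 * i - 1 by ring]
            simp [sliceMap, htr, hte, if_pos hpos, List.map_append]
          · have he : ∀ (g : Int → String),
                PySem.List.slice ((PySem.List.pyRange 0 n).map g) (some (i * 100 - 1)) (some (i * 100)) = [] := by
              intro g
              rw [show i = 0 by omega]; norm_num [sliceNegOneZero]
            simp [sliceMap, htr, he, if_neg hpos, ← List.map_append]
        · -- normal iteration: both loops append a full chunk and recurse at i+1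
          simp only [if_neg hflag]
          have htr : PySem.List.slice (PySem.List.pyRange 0 n) (some (20 + 100 * i)) (some (80 + 100 * i - 1)) =
              PySem.List.pyRange (20 + 100 * i) (min (20 + 100 * i + 59) n) := by
            rw [slicePyRange n _ _ (by omega) (by omega),
              show (80 : Int) + 100 * i - 1 = 20 + 100 * i + 59 by ring]
          by_cases hpos : (0 : Int) < i
          · have hte : PySem.List.slice (PySem.List.pyRange 0 n) (some (i * 100 - 1)) (some (i * 100)) =
                [100 * i - 1] := by
              rw [slicePyRange n _ _ (by omega) (by omega), min_eq_left (by omega),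
                PySem.List.pyRange_one_cons (by omega), PySem.List.pyRange_one_eq_nil (by omega)]
              rw [show i * 100 - 1 = 100 * i - 1 by ring]
            simp only [sliceMap, htr, hte, if_pos hpos, ← List.map_append]
            exact ih (i + 1) (by omega) _ _
          · have he : ∀ (g : Int → String),
                PySem.List.slice ((PySem.List.pyRange 0 n).map g) (some (i * 100 - 1)) (some (i * 100)) = [] := by
              intro g
              rw [show i = 0 by omega]; norm_num [sliceNegOneZero]
            simp only [sliceMap, htr, he, if_neg hpos, ← List.map_append, List.append_nil]
            exact ih (i + 1) (by omega) _ _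

-- ===== VERDICT (by name: the statement is the Claim_ definition above) =====
theorem prepare_data_ScanNet_spec : Claim_equal_prepare_data_ScanNet := by
  intro dir1 dir2 dir3 dir4 n _
  unfold Spec_prepare_data_ScanNet prepare_data_ScanNet prepare_data_ScanNet_alt
  rcases lt_or_ge n 20 with hn | hn
  · -- fewer than 20 images: both loops stop immediately, all eight lists are empty
    simp only [fold4_eq, List.nil_append]
    rw [prepIdxLoopB_stop n 100 0 [] [] (by omega)]
    simp [prepDataLoopA, hn, PySem.List.length_pyRange_one]
  · simp only [fold4_eq, List.nil_append]
    have h := loopAB (fun i => dir1 ++ PySem.Int.toStr i ++ ".jpg")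
      (fun i => dir2 ++ PySem.Int.toStr i ++ ".txt")
      (fun i => dir3 ++ PySem.Int.toStr i ++ "_compressed.npz")
      (fun i => dir4 ++ PySem.Int.toStr i ++ "_weight.npz") n hn 100 0 (by omega) [] []
    simpa using h
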